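-- pv_equiv track=rewrite | github.com/hogiljung/Algorithms | 프로그래머스/lv2/131701. 연속 부분 수열 합의 개수/연속 부분 수열 합의 개수.py | solution
-- ===== SOURCE A (Python) =====
-- from collections import deque
--
-- def solution(elements):
--     temp = set()
--     elements = deque(elements)
--     for _ in range(len(elements)):
--         s = 0
--         for i in range(len(elements)):
--             s += elements[i]
--             temp.add(s)
--         elements.append(elements.popleft())
--     return len(temp)
-- ===== SOURCE B (Python) =====
-- def solution(elements):
--     n = len(elements)
--     prefix = [0]
--     acc = 0
--     for x in elements + elements:
--         acc += x
--         prefix.append(acc)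
--     sums = set()
--     for start in range(n):
--         base = prefix[start]
--         sums.update([p - base for p in prefix[start + 1:start + n + 1]])
--     return len(sums)
-- ===== Notes on version B (the rewrite author's own statement) =====
-- stated objective: alternative
-- what changed: replaces the deque rotation in which every rotation re-accumulates all n prefix sums element by element through deque random access with a single prefix-sum table over the doubled list, from which each circular window sum is one subtraction taken via a slice
import Mathlib
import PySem

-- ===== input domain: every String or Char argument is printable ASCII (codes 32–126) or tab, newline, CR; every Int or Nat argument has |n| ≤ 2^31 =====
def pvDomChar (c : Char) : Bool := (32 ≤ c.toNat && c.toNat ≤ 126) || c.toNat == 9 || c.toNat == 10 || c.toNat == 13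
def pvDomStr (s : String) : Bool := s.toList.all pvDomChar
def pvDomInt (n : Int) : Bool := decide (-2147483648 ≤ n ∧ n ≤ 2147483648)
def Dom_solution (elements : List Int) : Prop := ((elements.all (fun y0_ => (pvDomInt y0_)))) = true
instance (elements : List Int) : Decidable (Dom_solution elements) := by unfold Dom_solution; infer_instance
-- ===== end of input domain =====

-- B replaces A's deque rotation with per-rotation re-accumulation by one prefix-sum table over the
-- doubled list, from which each circular window sum is a single subtraction (A mutates only a local
-- deque copy of its argument; the argument itself is not mutated).

-- ===== PORT A =====
-- elements.append(elements.popleft())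
def rotA (l : List Int) : List Int :=
  match l with
  | [] => []
  | x :: xs => xs ++ [x]

def solution (elements : List Int) : Int :=
  let res := (PySem.List.pyRange 0 (elements.length : Int) 1).foldl
    (fun (st : List Int × PySem.Set Int) _ =>
      -- s = 0; for i in range(len(elements)): s += elements[i]; temp.add(s)
      -- (indexing is always in range here, so pyGetD is exact)
      let inner := (PySem.List.pyRange 0 (st.1.length : Int) 1).foldl
        (fun (p : Int × PySem.Set Int) i =>
          let s := p.1 + PySem.List.pyGetD st.1 i 0
          (s, PySem.Set.add p.2 s))
        ((0 : Int), st.2)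
      (rotA st.1, inner.2))
    (elements, (PySem.Set.empty : PySem.Set Int))
  PySem.Set.len res.2

-- ===== PORT B =====
def solution_alt (elements : List Int) : Int :=
  let n : Int := (elements.length : Int)
  -- prefix = [0]; acc = 0; for x in elements + elements: acc += x; prefix.append(acc)
  let built := (elements ++ elements).foldl
    (fun (st : Int × List Int) x => (st.1 + x, st.2 ++ [st.1 + x]))
    ((0 : Int), [(0 : Int)])
  let prefixL := built.2
  -- for start in range(n): base = prefix[start]; sums.update([p - base for p in prefix[start+1:start+n+1]])
  -- (prefix[start] is always in range here, so pyGetD is exact)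
  let sums := (PySem.List.pyRange 0 n 1).foldl
    (fun (S : PySem.Set Int) start =>
      let base := PySem.List.pyGetD prefixL start 0
      PySem.Set.update S
        ((PySem.List.slice prefixL (some (start + 1)) (some (start + n + 1))).map
          (fun p => p - base)))
    (PySem.Set.empty : PySem.Set Int)
  PySem.Set.len sums

-- ===== PRECONDITION & SPEC =====
def Spec_solution (elements : List Int) (out : Int) : Prop := out = solution_alt elements
instance (elements : List Int) (out : Int) : Decidable (Spec_solution elements out) := by unfold Spec_solution; infer_instance

-- ===== CLAIM (what is proved, stated in full; the proofs are below) =====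
def Claim_equal_solution : Prop := ∀ (elements : List Int), Dom_solution elements → Spec_solution elements (solution elements)

-- ===== LEMMAS AND PROOFS =====

-- running prefix sums of L starting from accumulator s
def pfx : List Int → Int → List Int
  | [], _ => []
  | x :: xs, s => (s + x) :: pfx xs (s + x)

-- B's per-start update list, named for the proofs
def Fb (l : List Int) (start : Int) : List Int :=
  (PySem.List.slice ((0 : Int) :: pfx (l ++ l) 0)
      (some (start + 1)) (some (start + (l.length : Int) + 1))).map
    (fun p => p - PySem.List.pyGetD ((0 : Int) :: pfx (l ++ l) 0) start 0)

theorem length_pfx (L : List Int) (s : Int) : (pfx L s).length = L.length := by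
  induction L generalizing s with
  | nil => rfl
  | cons x xs ih => simp [pfx, ih]

theorem getElem_pfx (L : List Int) (s : Int) (i : Nat) (h : i < L.length) :
    (pfx L s)[i]'(by rw [length_pfx]; exact h) = s + (L.take (i + 1)).sum := by
  induction L generalizing s i with
  | nil => simp at h
  | cons x xs ih =>
    cases i with
    | zero => simp [pfx]
    | succ j =>
      have hj : j < xs.length := by simpa using h
      simp only [pfx, List.getElem_cons_succ]
      rw [ih (s + x) j hj]
      simp only [List.take_succ_cons, List.sum_cons]
      ring

theorem mem_pfx (L : List Int) (s : Int) (y : Int) :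
    y ∈ pfx L s ↔ ∃ i : Nat, i < L.length ∧ y = s + (L.take (i + 1)).sum := by
  rw [List.mem_iff_getElem]
  constructor
  · rintro ⟨i, hi, heq⟩
    have hi' : i < L.length := by rwa [length_pfx] at hi
    exact ⟨i, hi', by rw [← heq, getElem_pfx L s i hi']⟩
  · rintro ⟨i, hi, rfl⟩
    exact ⟨i, by rw [length_pfx]; exact hi, getElem_pfx L s i hi⟩

-- A's inner loop over a list
theorem foldl_pfx (L : List Int) (s : Int) (S : PySem.Set Int) :
    L.foldl (fun (p : Int × PySem.Set Int) x => (p.1 + x, PySem.Set.add p.2 (p.1 + x))) (s, S)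
      = (s + L.sum, PySem.Set.update S (pfx L s)) := by
  induction L generalizing s S with
  | nil => simp [pfx, PySem.Set.update]
  | cons x xs ih =>
    simp only [List.foldl_cons, ih, pfx, List.sum_cons, PySem.Set.update_cons, Prod.mk.injEq]
    exact ⟨by ring, trivial⟩

-- B's prefix-table building loop
theorem foldl_build (L : List Int) (s : Int) (p : List Int) :
    L.foldl (fun (st : Int × List Int) x => (st.1 + x, st.2 ++ [st.1 + x])) (s, p)
      = (s + L.sum, p ++ pfx L s) := by
  induction L generalizing s p with
  | nil => simp [pfx]
  | cons x xs ih =>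
    simp only [List.foldl_cons, ih, pfx, List.sum_cons, Prod.mk.injEq]
    exact ⟨by ring, by simp⟩

-- the set accumulated by A after m rotations
def aIter (l0 : List Int) : Nat → PySem.Set Int
  | 0 => PySem.Set.empty
  | m + 1 => PySem.Set.update (aIter l0 m) (pfx (l0.rotate m) 0)

theorem rotA_eq_rotate (l : List Int) : rotA l = l.rotate 1 := by
  cases l with
  | nil => rfl
  | cons x xs => simp [rotA, List.rotate_cons_succ]

theorem loopA (l0 : List Int) (m : Nat) :
    (PySem.List.pyRange 0 (m : Int) 1).foldl
      (fun (st : List Int × PySem.Set Int) _ =>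
        (rotA st.1,
          ((PySem.List.pyRange 0 (st.1.length : Int) 1).foldl
            (fun (p : Int × PySem.Set Int) i =>
              (p.1 + PySem.List.pyGetD st.1 i 0,
                PySem.Set.add p.2 (p.1 + PySem.List.pyGetD st.1 i 0)))
            ((0 : Int), st.2)).2))
      (l0, (PySem.Set.empty : PySem.Set Int))
      = (l0.rotate m, aIter l0 m) := by
  induction m with
  | zero => simp [PySem.List.pyRange_one_eq_nil, aIter]
  | succ m ih =>
    rw [show ((m + 1 : Nat) : Int) = (m : Int) + 1 by push_cast; ring,
      PySem.List.pyRange_one_succ_right (by positivity), List.foldl_append, ih]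
    simp only [List.foldl_cons, List.foldl_nil]
    rw [PySem.List.foldl_pyRange_zero_pyGetD' (l0.rotate m) 0
      (fun (p : Int × PySem.Set Int) x => (p.1 + x, PySem.Set.add p.2 (p.1 + x))) (0, aIter l0 m)]
    rw [foldl_pfx]
    simp [rotA_eq_rotate, List.rotate_rotate, aIter]

theorem mem_aIter (l0 : List Int) (m : Nat) (y : Int) :
    y ∈ aIter l0 m ↔ ∃ k : Nat, k < m ∧ y ∈ pfx (l0.rotate k) 0 := by
  induction m with
  | zero => simp [aIter, PySem.Set.empty]
  | succ m ih =>
    simp only [aIter, PySem.Set.mem_update, ih]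
    constructor
    · rintro (⟨k, hk, hy⟩ | hy)
      · exact ⟨k, by omega, hy⟩
      · exact ⟨m, by omega, hy⟩
    · rintro ⟨k, hk, hy⟩
      by_cases h : k = m
      · exact Or.inr (h ▸ hy)
      · exact Or.inl ⟨k, by omega, hy⟩

theorem nodup_aIter (l0 : List Int) (m : Nat) : (aIter l0 m).Nodup := by
  induction m with
  | zero => simp [aIter, PySem.Set.empty]
  | succ m ih => exact PySem.Set.nodup_update _ _ ih

-- generic nested-update fold (B's outer loop)
theorem mem_foldl_update (l : List Int) (F : Int → List Int) (S : PySem.Set Int) (y : Int) :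
    y ∈ l.foldl (fun S b => PySem.Set.update S (F b)) S ↔ y ∈ S ∨ ∃ b ∈ l, y ∈ F b := by
  induction l generalizing S with
  | nil => simp
  | cons b bs ih =>
    simp only [List.foldl_cons, ih, PySem.Set.mem_update]
    constructor
    · rintro ((h | h) | ⟨c, hc, h⟩)
      · exact Or.inl h
      · exact Or.inr ⟨b, by simp, h⟩
      · exact Or.inr ⟨c, by simp [hc], h⟩
    · rintro (h | ⟨c, hc, h⟩)
      · exact Or.inl (Or.inl h)
      · rcases List.mem_cons.mp hc with rfl | hc
        · exact Or.inl (Or.inr h)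
        · exact Or.inr ⟨c, hc, h⟩

theorem nodup_foldl_update (l : List Int) (F : Int → List Int) (S : PySem.Set Int)
    (hS : S.Nodup) : (l.foldl (fun S b => PySem.Set.update S (F b)) S).Nodup := by
  induction l generalizing S with
  | nil => exact hS
  | cons b bs ih => exact ih _ (PySem.Set.nodup_update _ _ hS)

-- value of the prefix table at a natural index
theorem prefix_getD (D : List Int) (j : Nat) (hj : j ≤ D.length) :
    PySem.List.pyGetD ((0 : Int) :: pfx D 0) (j : Int) 0 = (D.take j).sum := by
  cases j with
  | zero => simp [PySem.List.pyGetD_zero_cons]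
  | succ i =>
    have hi : i < (pfx D 0).length := by rw [length_pfx]; omega
    rw [PySem.List.pyGetD_natCast]
    have h1 : ((0 : Int) :: pfx D 0).getD (i + 1) 0 = (pfx D 0)[i] := by
      simp [List.getD, List.getElem?_eq_getElem hi]
    rw [h1, getElem_pfx D 0 i (by omega)]
    simp

-- the window-sum identity: a prefix sum of the k-th rotation is a difference of
-- prefix sums of the doubled list
theorem rot_take_sum (l : List Int) (k i : Nat) (hk : k < l.length) (hi : i < l.length) :
    ((l.rotate k).take (i + 1)).sum
      = ((l ++ l).take (k + (i + 1))).sum - ((l ++ l).take k).sum := by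
  have h1 : (l ++ l).take (k + (i + 1)) = (l ++ l).take k ++ ((l ++ l).drop k).take (i + 1) :=
    List.take_add
  have h2 : (l ++ l).drop k = l.drop k ++ l := List.drop_append_of_le_length (by omega)
  have h3 : l.rotate k = l.drop k ++ l.take k := List.rotate_eq_drop_append_take (by omega)
  have h4 : (l.drop k ++ l).take (i + 1) = (l.drop k ++ l.take k).take (i + 1) := by
    rw [List.take_append, List.take_append]
    congr 1
    rw [List.take_take]
    congr 1
    have hdl : (l.drop k).length = l.length - k := by simp
    omega
  rw [h1, List.sum_append, h3, ← h4, h2]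
  ring

-- length of the prefix table
theorem length_prefixL (l : List Int) :
    (((0 : Int) :: pfx (l ++ l) 0)).length = 2 * l.length + 1 := by
  simp [length_pfx]; omega

-- membership in B's per-start update list
theorem mem_Fb (l : List Int) (k : Nat) (hk : k < l.length) (y : Int) :
    y ∈ Fb l (k : Int)
      ↔ ∃ j : Nat, j < l.length ∧
          y = ((l ++ l).take (k + (j + 1))).sum - ((l ++ l).take k).sum := by
  unfold Fb
  have hlen : (((0 : Int) :: pfx (l ++ l) 0)).length = 2 * l.length + 1 := length_prefixL l
  set P : List Int := (0 : Int) :: pfx (l ++ l) 0 with hP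
  have hc1 : ((k : Int) + 1) = ((k + 1 : Nat) : Int) := by push_cast; ring
  have hc2 : ((k : Int) + (l.length : Int) + 1) = ((k + 1 + l.length : Nat) : Int) := by
    push_cast; ring
  rw [hc1, hc2, PySem.List.slice_natCast]
  have hmin : (k + 1 + l.length - (k + 1)) = l.length := by omega
  rw [hmin]
  have hbase : PySem.List.pyGetD P (k : Int) 0 = ((l ++ l).take k).sum :=
    prefix_getD (l ++ l) k (by simp; omega)
  rw [hbase]
  have hPidx : ∀ (j : Nat) (h : j < ((P.drop (k + 1)).take l.length).length),
      ((P.drop (k + 1)).take l.length)[j]'h = ((l ++ l).take (k + (j + 1))).sum := by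
    intro j h
    have hjlen : j < l.length := by
      simp only [List.length_take, List.length_drop, hlen] at h; omega
    rw [List.getElem_take, List.getElem_drop]
    have hgd := prefix_getD (l ++ l) (k + 1 + j) (by simp; omega)
    rw [PySem.List.pyGetD_natCast] at hgd
    have hlt : k + 1 + j < P.length := by rw [hlen]; omega
    have hlt' : k + 1 + j < (((0 : Int) :: pfx (l ++ l) 0)).length := by
      rw [← hP]; exact hlt
    have : P[k + 1 + j]'hlt = ((l ++ l).take (k + 1 + j)).sum := by
      show (((0 : Int) :: pfx (l ++ l) 0))[k + 1 + j]'hlt' = ((l ++ l).take (k + 1 + j)).sum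
      rw [← hgd]; simp [List.getD, List.getElem?_eq_getElem hlt']
    rw [this, show k + 1 + j = k + (j + 1) by omega]
  simp only [List.mem_map]
  constructor
  · rintro ⟨p, hp, rfl⟩
    rw [List.mem_iff_getElem] at hp
    obtain ⟨j, hj, rfl⟩ := hp
    have hjlen : j < l.length := by
      simp only [List.length_take, List.length_drop, hlen] at hj; omega
    exact ⟨j, hjlen, by rw [hPidx j hj]⟩
  · rintro ⟨j, hj, rfl⟩
    have hjP : j < ((P.drop (k + 1)).take l.length).length := by
      simp only [List.length_take, List.length_drop, hlen]; omega
    exact ⟨_, List.getElem_mem hjP, by rw [hPidx j hjP]⟩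

-- ===== VERDICT (by name: the statement is the Claim_ definition above) =====
theorem solution_spec : Claim_equal_solution := by
  intro l _
  unfold Spec_solution
  have hA : solution l = PySem.Set.len (aIter l l.length) := by
    simp only [solution]
    rw [loopA]
  have hB : solution_alt l
      = PySem.Set.len ((PySem.List.pyRange 0 (l.length : Int) 1).foldl
          (fun S b => PySem.Set.update S (Fb l b)) PySem.Set.empty) := by
    simp only [solution_alt, foldl_build, Fb, List.singleton_append]
  have ndA := nodup_aIter l l.length
  have ndB := nodup_foldl_update (PySem.List.pyRange 0 (l.length : Int) 1) (Fb l)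
    PySem.Set.empty (by simp [PySem.Set.empty])
  have hmem : ∀ y, y ∈ aIter l l.length ↔
      y ∈ (PySem.List.pyRange 0 (l.length : Int) 1).foldl
        (fun S b => PySem.Set.update S (Fb l b)) PySem.Set.empty := by
    intro y
    rw [mem_aIter, mem_foldl_update]
    constructor
    · rintro ⟨k, hk, hy⟩
      rw [mem_pfx] at hy
      obtain ⟨i, hi, rfl⟩ := hy
      rw [List.length_rotate] at hi
      refine Or.inr ⟨(k : Int), ?_, ?_⟩
      · rw [PySem.List.mem_pyRange_one]
        exact ⟨by positivity, by exact_mod_cast hk⟩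
      · rw [mem_Fb l k hk]
        exact ⟨i, hi, by rw [zero_add, rot_take_sum l k i hk hi]⟩
    · rintro (h | ⟨b, hb, hy⟩)
      · simp [PySem.Set.empty] at h
      · rw [PySem.List.mem_pyRange_one] at hb
        obtain ⟨hb0, hbn⟩ := hb
        have hbk : b = ((b.toNat : Nat) : Int) := (Int.toNat_of_nonneg hb0).symm
        have hk : b.toNat < l.length := by omega
        rw [hbk, mem_Fb l b.toNat hk] at hy
        obtain ⟨j, hj, rfl⟩ := hy
        refine ⟨b.toNat, hk, ?_⟩
        rw [mem_pfx]
        exact ⟨j, by rw [List.length_rotate]; exact hj,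
          by rw [zero_add, rot_take_sum l b.toNat j hk hj]⟩
  have hperm := (List.perm_ext_iff_of_nodup ndA ndB).mpr hmem
  rw [hA, hB]
  simp [PySem.Set.len, hperm.length_eq]
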